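-- pv_equiv track=rewrite | github.com/tkasasagi/colorization | functions.py | findchunk
-- ===== SOURCE A (Python) =====
-- def findchunk(histogram, threshold):
--     start = []
--     stop = []
--     count = 0
--     prev = False
--     for i in range(len(histogram)):
--         if histogram[i] > threshold:
--             if prev == False:
--                 start.append(i)
--                 prev = True
--                 count += 1
--             else:
--                 count += 1
--         else:
--             if prev == True:
--                 if count < 500:
--                     count = 0
--                     prev = False
--                     start.pop()
--                 else:
--                     stop.append(i)
--                     count = 0
--                     prev = False
--
--     return start, stop
-- ===== SOURCE B (Python) =====
-- def findchunk(histogram, threshold):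
--     # Phase 1: collect maximal above-threshold runs as (start, terminator or None).
--     n = len(histogram)
--     runs = []
--     i = 0
--     while i < n:
--         if histogram[i] > threshold:
--             s = i
--             i += 1
--             while i < n and histogram[i] > threshold:
--                 i += 1
--             runs.append((s, i if i < n else None))
--         else:
--             i += 1
--     # Phase 2: emit; a run reaching the end keeps its start unconditionally (no stop),
--     # a terminated run is kept only if its length is >= 500.
--     start = []
--     stop = []
--     for s, t in runs:
--         if t is None:
--             start.append(s)
--         elif t - s >= 500:
--             start.append(s)
--             stop.append(t)
--     return start, stop
-- ===== Notes on version B (the rewrite author's own statement) =====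
-- stated objective: alternative
-- what changed: Replaces A's single stateful scan (prev/count flags, speculative start.append undone by pop) with a two-phase decomposition: first collect maximal above-threshold runs as (start, terminator-or-None) pairs, then filter/emit them by length.
import Mathlib
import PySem

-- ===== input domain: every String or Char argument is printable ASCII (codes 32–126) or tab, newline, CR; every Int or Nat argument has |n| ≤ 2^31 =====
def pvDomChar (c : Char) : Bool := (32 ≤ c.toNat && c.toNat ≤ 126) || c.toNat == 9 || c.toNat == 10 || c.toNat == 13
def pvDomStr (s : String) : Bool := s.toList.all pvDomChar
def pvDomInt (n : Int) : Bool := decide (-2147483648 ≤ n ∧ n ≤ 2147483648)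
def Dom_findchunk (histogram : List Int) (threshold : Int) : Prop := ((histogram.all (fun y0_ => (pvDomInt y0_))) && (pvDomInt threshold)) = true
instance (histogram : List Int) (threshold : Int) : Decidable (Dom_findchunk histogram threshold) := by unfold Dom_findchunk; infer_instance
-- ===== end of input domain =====

-- B replaces A's single stateful scan (prev/count flags, speculative append undone by pop)
-- with a two-phase decomposition (collect maximal runs, then filter/emit); return value only.


-- ===== PORT A =====
-- A's 'for i in range(len(histogram))' over histogram[i] becomes a structural
-- recursion over the list elements carrying the index i and the loop state
-- (start, stop, count, prev) unchanged; start.pop() is dropLast.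
def findchunkLoop (thr : Int) : List Int → Int → List Int → List Int → Int → Bool → List Int × List Int
  | [], _, start, stop, _, _ => (start, stop)
  | x :: xs, i, start, stop, count, prev =>
    if x > thr then
      if prev = false then
        findchunkLoop thr xs (i + 1) (start ++ [i]) stop (count + 1) true
      else
        findchunkLoop thr xs (i + 1) start stop (count + 1) prev
    else
      if prev = true then
        if count < 500 then
          findchunkLoop thr xs (i + 1) start.dropLast stop 0 false
        else
          findchunkLoop thr xs (i + 1) start (stop ++ [i]) 0 false
      else
        findchunkLoop thr xs (i + 1) start stop count prev

def findchunk (histogram : List Int) (threshold : Int) : List Int × List Int :=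
  findchunkLoop threshold histogram 0 [] [] 0 false

-- ===== PORT B =====
-- Phase 1 of Source B: the outer while (skipping) and the inner while (inside a run)
-- become a mutual structural recursion producing the run list (start, terminator?).
mutual
def pvRuns (thr : Int) : List Int → Int → List (Int × Option Int)
  | [], _ => []
  | x :: xs, i => if x > thr then pvRunGo thr xs (i + 1) i else pvRuns thr xs (i + 1)
def pvRunGo (thr : Int) : List Int → Int → Int → List (Int × Option Int)
  | [], _, s => [(s, none)]
  | x :: xs, i, s =>
    if x > thr then pvRunGo thr xs (i + 1) s else (s, some i) :: pvRuns thr xs (i + 1)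
end

-- Phase 2 of Source B: emit starts/stops from the run list.
def pvEmit : List (Int × Option Int) → List Int × List Int
  | [] => ([], [])
  | (s, none) :: rs => let p := pvEmit rs; (s :: p.1, p.2)
  | (s, some t) :: rs =>
    let p := pvEmit rs
    if t - s ≥ 500 then (s :: p.1, t :: p.2) else p

def findchunk_alt (histogram : List Int) (threshold : Int) : List Int × List Int :=
  pvEmit (pvRuns threshold histogram 0)

-- ===== PRECONDITION & SPEC =====
def Spec_findchunk (histogram : List Int) (threshold : Int) (out : List Int × List Int) : Prop := out = findchunk_alt histogram threshold
instance (histogram : List Int) (threshold : Int) (out : List Int × List Int) : Decidable (Spec_findchunk histogram threshold out) := by unfold Spec_findchunk; infer_instance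

-- ===== CLAIM (what is proved, stated in full; the proofs are below) =====
def Claim_equal_findchunk : Prop := ∀ (histogram : List Int) (threshold : Int), Dom_findchunk histogram threshold → Spec_findchunk histogram threshold (findchunk histogram threshold)

-- ===== LEMMAS AND PROOFS =====

-- Mutual invariant: with prev = false (count = 0) the loop finishes the remaining
-- runs pvRuns; with prev = true and count = i - s (run started at s, already in
-- start) it finishes pvRunGo.
theorem findchunkLoop_main (thr : Int) (xs : List Int) :
    ∀ (i : Int) (start0 stop0 : List Int) (s : Int),
      (findchunkLoop thr xs i start0 stop0 0 false =
        (start0 ++ (pvEmit (pvRuns thr xs i)).1, stop0 ++ (pvEmit (pvRuns thr xs i)).2)) ∧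
      (findchunkLoop thr xs i (start0 ++ [s]) stop0 (i - s) true =
        (start0 ++ (pvEmit (pvRunGo thr xs i s)).1, stop0 ++ (pvEmit (pvRunGo thr xs i s)).2)) := by
  induction xs with
  | nil =>
    intro i start0 stop0 s
    simp [findchunkLoop, pvRuns, pvRunGo, pvEmit]
  | cons x xs ih =>
    intro i start0 stop0 s
    constructor
    · by_cases hx : x > thr
      · have h2 := (ih (i + 1) start0 stop0 i).2
        have hc : (0 : Int) + 1 = (i + 1) - i := by omega
        simp only [findchunkLoop, pvRuns, hx, if_true, hc]
        exact h2
      · have h1 := (ih (i + 1) start0 stop0 s).1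
        simp only [findchunkLoop, pvRuns, hx, if_false, reduceIte]
        exact h1
    · by_cases hx : x > thr
      · have h2 := (ih (i + 1) start0 stop0 s).2
        have hc : (i - s) + 1 = (i + 1) - s := by omega
        simp only [findchunkLoop, pvRunGo, hx, if_true, hc]
        exact h2
      · by_cases hcnt : i - s < 500
        · have h1 := (ih (i + 1) start0 stop0 s).1
          have hne : ¬ (i - s ≥ 500) := by omega
          simp only [findchunkLoop, pvRunGo, pvEmit, hx, hcnt, if_false, if_true,
            if_neg hne, List.dropLast_concat]
          exact h1
        · have h1 := (ih (i + 1) (start0 ++ [s]) (stop0 ++ [i]) s).1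
          have hge : (i - s) ≥ 500 := by omega
          simp only [findchunkLoop, pvRunGo, pvEmit, hx, hcnt, if_false, if_true,
            if_pos hge]
          rw [h1]
          simp

-- ===== VERDICT (by name: the statement is the Claim_ definition above) =====
theorem findchunk_spec : Claim_equal_findchunk := by
  intro histogram threshold _
  unfold Spec_findchunk findchunk findchunk_alt
  have h := (findchunkLoop_main threshold histogram 0 [] [] 0).1
  simpa using h
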